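-- pv_equiv track=rewrite | github.com/YeralCode/ITRC | repository/proyectos/DIAN/defensoria/transformar_columnas_defensoria.py | preprocess_line
-- ===== SOURCE A (Python) =====
-- TEMP_NEWLINE = '⏎'
--
-- TEMP_COMMA = '\uE000'
--
-- def preprocess_line(line: str) -> str:
--     """Preprocesa línea para manejar comas y saltos internos."""
--     if not line.strip():
--         return line
--
--     line = line.replace('\\n', TEMP_NEWLINE)
--     in_quotes = False
--     processed = []
--
--     for char in line:
--         if char == '"':
--             in_quotes = not in_quotes
--             processed.append(char)
--         elif char == ',' and not in_quotes:
--             processed.append(TEMP_COMMA)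
--         else:
--             processed.append(char)
--
--     return ''.join(processed)
-- ===== SOURCE B (Python) =====
-- TEMP_NEWLINE = '⏎'
--
-- TEMP_COMMA = '\uE000'
--
-- def preprocess_line(line: str) -> str:
--     """Segment-level rewrite: split on '"', replace commas only in the
--     even-indexed (outside-quotes) segments, and join back with '"'."""
--     if not line.strip():
--         return line
--     line = line.replace('\\n', TEMP_NEWLINE)
--     segments = line.split('"')
--     return '"'.join(seg.replace(',', TEMP_COMMA) if i % 2 == 0 else seg
--                     for i, seg in enumerate(segments))
-- ===== Notes on version B (the rewrite author's own statement) =====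
-- stated objective: simpler
-- what changed: Replaces the per-character quote-state loop with a split on the quote character, comma replacement on even-indexed segments only, and a join, turning the stateful scan into a segment-level transform done by C-level str methods.
import Mathlib
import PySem

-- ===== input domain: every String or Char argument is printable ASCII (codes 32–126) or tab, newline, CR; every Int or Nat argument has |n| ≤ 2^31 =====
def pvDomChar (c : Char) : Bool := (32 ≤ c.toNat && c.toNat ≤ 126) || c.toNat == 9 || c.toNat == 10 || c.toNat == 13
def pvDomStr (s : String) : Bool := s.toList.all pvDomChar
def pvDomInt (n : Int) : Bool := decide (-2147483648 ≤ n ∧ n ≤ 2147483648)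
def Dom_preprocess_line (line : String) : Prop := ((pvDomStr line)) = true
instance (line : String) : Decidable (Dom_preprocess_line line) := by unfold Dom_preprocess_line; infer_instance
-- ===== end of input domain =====

-- B replaces A's per-character quote-state loop by split('"') / even-index comma replacement / join('"') (objective: simpler).

-- ===== PORT A =====
def preprocess_line (line : String) : String :=
  if PySem.Str.strip line = "" then line
  else
    let line2 := PySem.Str.replace line "\\n" "⏎"
    let res := line2.toList.foldl
      (fun (st : Bool × List Char) c =>
        if c = '"' then (!st.1, st.2 ++ [c])
        else if c = ',' ∧ st.1 = false then (st.1, st.2 ++ ['\uE000'])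
        else (st.1, st.2 ++ [c]))
      (false, [])
    String.ofList res.2

-- ===== PORT B =====
def preprocess_line_alt (line : String) : String :=
  if PySem.Str.strip line = "" then line
  else
    let line2 := PySem.Str.replace line "\\n" "⏎"
    match PySem.Str.split? line2 "\"" with
    | some segments =>
        PySem.Str.join "\"" ((PySem.List.enumerate segments).map
          (fun p => if PySem.Int.mod p.1 2 == 0 then PySem.Str.replace p.2 "," "\uE000" else p.2))
    | none => line2   -- unreachable: the separator "\"" is nonempty, split? always returns some

-- ===== PRECONDITION & SPEC =====
def Spec_preprocess_line (line : String) (out : String) : Prop := out = preprocess_line_alt line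
instance (line : String) (out : String) : Decidable (Spec_preprocess_line line out) := by unfold Spec_preprocess_line; infer_instance

-- ===== CLAIM (what is proved, stated in full; the proofs are below) =====
def Claim_equal_preprocess_line : Prop := ∀ (line : String), Dom_preprocess_line line → Spec_preprocess_line line (preprocess_line line)

-- ===== LEMMAS AND PROOFS =====

-- substitution applied to a comma outside quotes
def pvSubst (c : Char) : Char := if c = ',' then '\uE000' else c

-- A's loop, written as structural recursion on the character list
def pvGoA : Bool → List Char → List Char
  | _, [] => []
  | q, c :: t =>
    if c = '"' then c :: pvGoA (!q) t
    else (if c = ',' ∧ q = false then '\uE000' else c) :: pvGoA q t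

-- prepend onto the head segment
def pvConsHead (x : List Char) : List (List Char) → List (List Char)
  | [] => [x]
  | h :: t => (x ++ h) :: t

-- the segments of a split on '"', recursively
def pvS : List Char → List (List Char)
  | [] => [[]]
  | c :: t => if c = '"' then [] :: pvS t else pvConsHead [c] (pvS t)

-- alternating even/odd segment transform (b = true: even segment, replace commas)
def pvW : Bool → List (List Char) → List (List Char)
  | _, [] => []
  | b, s :: ss => (if b then s.map pvSubst else s) :: pvW (!b) ss

theorem pvS_ne_nil (l : List Char) : pvS l ≠ [] := by
  cases l with
  | nil => simp [pvS]
  | cons c t =>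
    simp only [pvS]
    split
    · simp
    · cases h : pvS t <;> simp [pvConsHead]

theorem pv_go_split (l : List Char) : ∀ (fuel : Nat) (cur : List Char) (acc : List (List Char)),
    l.length < fuel →
    PySem.Chars.splitOn.go ['"'] fuel l cur acc = acc.reverse ++ pvConsHead cur.reverse (pvS l) := by
  induction l with
  | nil =>
    intro fuel cur acc h
    cases fuel with
    | zero => omega
    | succ f => simp [PySem.Chars.splitOn.go, pvS, pvConsHead]
  | cons c t ih =>
    intro fuel cur acc h
    cases fuel with
    | zero => simp at h
    | succ f =>
      by_cases hc : c = '"'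
      · subst hc
        rw [show PySem.Chars.splitOn.go ['"'] (f+1) ('"' :: t) cur acc
              = PySem.Chars.splitOn.go ['"'] f t [] (cur.reverse :: acc) by
            simp [PySem.Chars.splitOn.go, List.isPrefixOf]]
        rw [ih f [] (cur.reverse :: acc) (by simpa using h)]
        rcases hS : pvS t with _ | ⟨s, ss⟩
        · exact absurd hS (pvS_ne_nil t)
        · simp [pvS, pvConsHead, hS]
      · have hc' : ¬('"' = c) := fun h => hc h.symm
        rw [show PySem.Chars.splitOn.go ['"'] (f+1) (c :: t) cur acc
              = PySem.Chars.splitOn.go ['"'] f t (c :: cur) acc by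
            simp [PySem.Chars.splitOn.go, List.isPrefixOf, hc']]
        rw [ih f (c :: cur) acc (by simpa using h)]
        rcases hS : pvS t with _ | ⟨s, ss⟩
        · exact absurd hS (pvS_ne_nil t)
        · simp [pvS, pvConsHead, hS, hc]

theorem pv_splitOn_eq (l : List Char) : PySem.Chars.splitOn l ['"'] = pvS l := by
  rw [show PySem.Chars.splitOn l ['"'] = PySem.Chars.splitOn.go ['"'] (l.length + 1) l [] [] from rfl]
  rw [pv_go_split l (l.length + 1) [] [] (by omega)]
  rcases hS : pvS l with _ | ⟨s, ss⟩
  · exact absurd hS (pvS_ne_nil l)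
  · simp [pvConsHead]

theorem pv_replace_go (l : List Char) : ∀ (fuel : Nat) (acc : List Char),
    l.length ≤ fuel →
    PySem.Chars.replace.go [','] ['\uE000'] fuel l acc = acc.reverse ++ l.map pvSubst := by
  induction l with
  | nil =>
    intro fuel acc h
    cases fuel <;> simp [PySem.Chars.replace.go]
  | cons c t ih =>
    intro fuel acc h
    cases fuel with
    | zero => simp at h
    | succ f =>
      by_cases hc : c = ','
      · subst hc
        rw [show PySem.Chars.replace.go [','] ['\uE000'] (f+1) (',' :: t) acc
              = PySem.Chars.replace.go [','] ['\uE000'] f t ('\uE000' :: acc) by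
            simp [PySem.Chars.replace.go, List.isPrefixOf]]
        rw [ih f ('\uE000' :: acc) (by simpa using h)]
        simp [pvSubst]
      · have hc' : ¬(',' = c) := fun h => hc h.symm
        rw [show PySem.Chars.replace.go [','] ['\uE000'] (f+1) (c :: t) acc
              = PySem.Chars.replace.go [','] ['\uE000'] f t (c :: acc) by
            simp [PySem.Chars.replace.go, List.isPrefixOf, hc']]
        rw [ih f (c :: acc) (by simpa using h)]
        simp [pvSubst, hc]

theorem pv_replace_eq (l : List Char) :
    PySem.Chars.replace l [','] ['\uE000'] = l.map pvSubst := by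
  rw [show PySem.Chars.replace l [','] ['\uE000']
        = PySem.Chars.replace.go [','] ['\uE000'] l.length l [] by rfl]
  simpa using pv_replace_go l l.length [] (le_refl _)

theorem pvW_ne_nil (b : Bool) (ss : List (List Char)) (h : ss ≠ []) : pvW b ss ≠ [] := by
  cases ss with
  | nil => exact absurd rfl h
  | cons s t => simp [pvW]

-- pull the first character of the head segment out of the join
theorem pv_join_cons_head (a : Char) (x : List Char) (rest : List (List Char)) :
    PySem.Chars.join ['"'] ((a :: x) :: rest) = a :: PySem.Chars.join ['"'] (x :: rest) := by
  cases rest with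
  | nil => simp [PySem.Chars.join_singleton]
  | cons y r => rw [PySem.Chars.join_cons_cons, PySem.Chars.join_cons_cons]; simp

-- core: the segment-level transform equals A's stateful scan
theorem pv_main (cs : List Char) : ∀ (q : Bool),
    PySem.Chars.join ['"'] (pvW (!q) (pvS cs)) = pvGoA q cs := by
  induction cs with
  | nil => intro q; cases q <;> simp [pvS, pvW, pvGoA, PySem.Chars.join_singleton]
  | cons c t ih =>
    intro q
    by_cases hc : c = '"'
    · subst hc
      rw [show pvS ('"' :: t) = [] :: pvS t by simp [pvS]]
      rw [show pvW (!q) ([] :: pvS t) = [] :: pvW (!(!q)) (pvS t) by cases q <;> simp [pvW]]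
      have hne := pvW_ne_nil (!(!q)) (pvS t) (pvS_ne_nil t)
      rcases hW : pvW (!(!q)) (pvS t) with _ | ⟨w, ws⟩
      · exact absurd hW hne
      · have hih := ih (!q)
        rw [hW] at hih
        rw [PySem.Chars.join_cons_cons]
        simp [pvGoA, hih]
    · rw [show pvS (c :: t) = pvConsHead [c] (pvS t) by simp [pvS, hc]]
      rcases hS : pvS t with _ | ⟨s, ss⟩
      · exact absurd hS (pvS_ne_nil t)
      · have ihq := ih q
        rw [hS] at ihq
        rw [show pvConsHead [c] (s :: ss) = (c :: s) :: ss by simp [pvConsHead]]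
        cases q with
        | false =>
          rw [show pvW (!false) ((c :: s) :: ss) = (pvSubst c :: s.map pvSubst) :: pvW false ss by
                simp [pvW]]
          rw [pv_join_cons_head]
          rw [show PySem.Chars.join ['"'] (s.map pvSubst :: pvW false ss) = pvGoA false t by
                rw [show s.map pvSubst :: pvW false ss = pvW (!false) (s :: ss) by simp [pvW]]
                exact ihq]
          simp only [pvGoA, if_neg hc, pvSubst]
          split <;> simp_all
        | true =>
          rw [show pvW (!true) ((c :: s) :: ss) = (c :: s) :: pvW true ss by simp [pvW]]
          rw [pv_join_cons_head]
          rw [show PySem.Chars.join ['"'] (s :: pvW true ss) = pvGoA true t by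
                rw [show s :: pvW true ss = pvW (!true) (s :: ss) by simp [pvW]]
                exact ihq]
          simp [pvGoA, hc]

-- A's foldl accumulates pvGoA
theorem pv_foldA (cs : List Char) : ∀ (q : Bool) (acc : List Char),
    (cs.foldl
      (fun (st : Bool × List Char) c =>
        if c = '"' then (!st.1, st.2 ++ [c])
        else if c = ',' ∧ st.1 = false then (st.1, st.2 ++ ['\uE000'])
        else (st.1, st.2 ++ [c]))
      (q, acc)).2 = acc ++ pvGoA q cs := by
  induction cs with
  | nil => intro q acc; simp [pvGoA]
  | cons c t ih =>
    intro q acc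
    by_cases hc : c = '"'
    · subst hc
      simp only [List.foldl_cons]
      rw [ih]
      simp [pvGoA]
    · by_cases hcq : c = ',' ∧ q = false
      · simp only [List.foldl_cons, if_neg hc, if_pos hcq]
        rw [ih]
        simp [pvGoA, hcq]
      · simp only [List.foldl_cons, if_neg hc, if_neg hcq]
        rw [ih]
        simp [pvGoA, hc, hcq]

-- Python's  (k+1) % 2 == 0  is the negation of  k % 2 == 0  (k ≥ 0)
theorem pv_mod_flip (k : Int) (_hk : 0 ≤ k) :
    (PySem.Int.mod (k + 1) 2 == 0) = !(PySem.Int.mod k 2 == 0) := by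
  simp only [PySem.Int.mod, Int.fmod_eq_emod]
  have h1 : (k + 1) % 2 = (k % 2 + 1) % 2 := by omega
  rcases Int.emod_two_eq_zero_or_one k with h | h <;> simp [h1, h]

-- B's enumerate-map equals pvW on the underlying char lists
theorem pv_enum_map (segs : List String) : ∀ (k : Int), 0 ≤ k →
    ((PySem.List.enumerate segs k).map
      (fun p => if PySem.Int.mod p.1 2 == 0 then PySem.Str.replace p.2 "," "\uE000" else p.2)).map String.toList
    = pvW (PySem.Int.mod k 2 == 0) (segs.map String.toList) := by
  induction segs with
  | nil => intro k _; simp [PySem.List.enumerate, pvW]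
  | cons s t ih =>
    intro k hk
    simp only [PySem.List.enumerate, List.map_cons, pvW]
    rw [ih (k + 1) (by omega), pv_mod_flip k hk]
    congr 1
    by_cases h : (PySem.Int.mod k 2 == 0) = true
    · rw [if_pos h, if_pos h, PySem.Str.toList_replace]
      have : ("," : String).toList = [','] := by decide
      have h2 : ("\uE000" : String).toList = ['\uE000'] := by decide
      rw [this, h2, pv_replace_eq]
    · rw [if_neg h, if_neg h]

-- ===== VERDICT (by name: the statement is the Claim_ definition above) =====
theorem preprocess_line_spec : Claim_equal_preprocess_line := by
  intro line _
  unfold Spec_preprocess_line preprocess_line preprocess_line_alt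
  by_cases hs : PySem.Str.strip line = ""
  · simp [hs]
  · simp only [if_neg hs]
    set line2 := PySem.Str.replace line "\\n" "⏎" with hline2
    -- B's split? always returns some; characterise the segments
    have hsep : ("\"" : String).toList = ['"'] := by decide
    have hsplit : PySem.Str.split? line2 "\"" ≠ none := by
      intro h
      have := PySem.Str.split?_map line2 "\""
      rw [h] at this
      simp [PySem.Chars.split?, hsep] at this
    rcases hsome : PySem.Str.split? line2 "\"" with _ | segs
    · exact absurd hsome hsplit
    · simp only
      have hbridge := PySem.Str.split?_map line2 "\""
      rw [hsome] at hbridge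
      simp only [Option.map_some, hsep, PySem.Chars.split?] at hbridge
      have hsegs : segs.map String.toList = pvS line2.toList := by
        have : segs.map String.toList = PySem.Chars.splitOn line2.toList ['"'] := by
          simpa using hbridge
        rw [this, pv_splitOn_eq]
      -- compare as char lists
      apply String.toList_injective ?_ |>.symm
      rw [PySem.Str.toList_join, hsep]
      rw [pv_enum_map segs 0 (by omega), hsegs]
      rw [show (PySem.Int.mod 0 2 == 0) = true by decide]
      rw [String.toList_ofList, pv_foldA line2.toList false []]
      simpa using pv_main line2.toList false
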